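-- pv_equiv track=rewrite | github.com/trantathung2004/AI_Homework1 | test.py | is_attack_knight
-- ===== SOURCE A (Python) =====
-- def is_attack_knight(queen1, queen2):
--     # Check for knight attacks
--     y1, x1 = queen1
--     y2, x2 = queen2
--     knight_moves = [(2, 1), (1, 2), (-1, 2), (-2, 1), (-2, -1), (-1, -2), (1, -2), (2, -1)]
--     for move in knight_moves:
--         ny, nx = y1 + move[0], x1 + move[1]
--         if (ny, nx) == (y2, x2):
--             return True
--     return False
-- ===== SOURCE B (Python) =====
-- def is_attack_knight(queen1, queen2):
--     y1, x1 = queen1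
--     y2, x2 = queen2
--     return {abs(y1 - y2), abs(x1 - x2)} == {1, 2}
-- ===== Notes on version B (the rewrite author's own statement) =====
-- stated objective: simpler
-- what changed: Replaced the enumeration of the 8 knight offsets with the closed-form displacement test {|dy|,|dx|} == {1,2}.
import Mathlib
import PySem

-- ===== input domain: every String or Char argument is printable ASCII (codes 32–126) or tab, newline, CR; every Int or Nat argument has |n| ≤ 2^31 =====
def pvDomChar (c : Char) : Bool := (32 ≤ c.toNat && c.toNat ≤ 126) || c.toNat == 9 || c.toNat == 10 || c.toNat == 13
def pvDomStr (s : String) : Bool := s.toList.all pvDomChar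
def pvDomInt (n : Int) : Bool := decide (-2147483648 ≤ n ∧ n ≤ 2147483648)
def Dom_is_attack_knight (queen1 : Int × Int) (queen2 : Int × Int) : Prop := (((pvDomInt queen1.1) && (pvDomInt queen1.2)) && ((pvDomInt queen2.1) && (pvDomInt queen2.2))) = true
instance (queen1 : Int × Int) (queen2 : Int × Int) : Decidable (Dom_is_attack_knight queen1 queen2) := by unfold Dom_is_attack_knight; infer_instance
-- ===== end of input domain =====

-- B replaces A's enumeration of the 8 knight offsets with the closed-form test {|dy|,|dx|} == {1,2} (simpler).


-- ===== PORT A =====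
-- the for-loop with early 'return True' over knight_moves, as structural recursion
def is_attack_knight_loop (y1 x1 y2 x2 : Int) : List (Int × Int) → Bool
  | [] => false
  | move :: rest =>
      if (y1 + move.1, x1 + move.2) = (y2, x2) then true
      else is_attack_knight_loop y1 x1 y2 x2 rest

def is_attack_knight (queen1 : Int × Int) (queen2 : Int × Int) : Bool :=
  let y1 := queen1.1; let x1 := queen1.2
  let y2 := queen2.1; let x2 := queen2.2
  let knight_moves : List (Int × Int) :=
    [(2, 1), (1, 2), (-1, 2), (-2, 1), (-2, -1), (-1, -2), (1, -2), (2, -1)]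
  is_attack_knight_loop y1 x1 y2 x2 knight_moves

-- ===== PORT B =====
def is_attack_knight_alt (queen1 : Int × Int) (queen2 : Int × Int) : Bool :=
  let y1 := queen1.1; let x1 := queen1.2
  let y2 := queen2.1; let x2 := queen2.2
  PySem.Set.equal (PySem.Set.ofList [|y1 - y2|, |x1 - x2|]) (PySem.Set.ofList [(1 : Int), 2])

-- ===== PRECONDITION & SPEC =====
def Spec_is_attack_knight (queen1 : Int × Int) (queen2 : Int × Int) (out : Bool) : Prop := out = is_attack_knight_alt queen1 queen2
instance (queen1 : Int × Int) (queen2 : Int × Int) (out : Bool) : Decidable (Spec_is_attack_knight queen1 queen2 out) := by unfold Spec_is_attack_knight; infer_instance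

-- ===== CLAIM (what is proved, stated in full; the proofs are below) =====
def Claim_equal_is_attack_knight : Prop := ∀ (queen1 : Int × Int) (queen2 : Int × Int), Dom_is_attack_knight queen1 queen2 → Spec_is_attack_knight queen1 queen2 (is_attack_knight queen1 queen2)

-- ===== LEMMAS AND PROOFS =====
theorem loop_eq_any (y1 x1 y2 x2 : Int) (l : List (Int × Int)) :
    is_attack_knight_loop y1 x1 y2 x2 l
      = l.any (fun m => decide ((y1 + m.1, x1 + m.2) = (y2, x2))) := by
  induction l with
  | nil => rfl
  | cons m rest ih =>
      simp only [is_attack_knight_loop, List.any_cons, ← ih]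
      split_ifs with h <;> simp [h]

theorem alt_pair (a b : Int) :
    PySem.Set.equal (PySem.Set.ofList [a, b]) (PySem.Set.ofList [(1 : Int), 2])
      = ((decide (a = 1) && decide (b = 2)) || (decide (a = 2) && decide (b = 1))) := by
  by_cases h1 : a = 1 <;> by_cases h2 : a = 2 <;> by_cases h3 : b = 1 <;> by_cases h4 : b = 2 <;>
    simp_all [PySem.Set.equal, PySem.Set.ofList, PySem.Set.add, PySem.Set.contains,
      PySem.Set.issubset, List.foldl] <;>
    split_ifs <;> simp_all

theorem is_attack_knight_eq (queen1 queen2 : Int × Int) :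
    is_attack_knight queen1 queen2 = is_attack_knight_alt queen1 queen2 := by
  obtain ⟨y1, x1⟩ := queen1
  obtain ⟨y2, x2⟩ := queen2
  simp only [is_attack_knight, is_attack_knight_alt, loop_eq_any, alt_pair]
  rw [Bool.eq_iff_iff]
  simp only [List.any_cons, List.any_nil, Bool.or_eq_true, Bool.and_eq_true,
    decide_eq_true_eq, Bool.or_false, Prod.mk.injEq]
  rcases abs_cases (y1 - y2) with ⟨hy, _⟩ | ⟨hy, _⟩ <;>
  rcases abs_cases (x1 - x2) with ⟨hx, _⟩ | ⟨hx, _⟩ <;>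
    rw [hy, hx] <;> omega

-- ===== VERDICT (by name: the statement is the Claim_ definition above) =====
theorem is_attack_knight_spec : Claim_equal_is_attack_knight := by
  intro q1 q2 _
  exact is_attack_knight_eq q1 q2
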